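-- pv_equiv track=rewrite | github.com/EmmaBin/DSA | third_greatest.py | ThirdGreatest
-- ===== SOURCE A (Python) =====
-- def ThirdGreatest(arr):
--   look_up={}
--   for ele in arr:
--     if ele not in look_up:
--       look_up[ele] = len(ele)
--     else:
--       continue
--   new_look =sorted(look_up.items(), key= lambda x:x[1], reverse=True)
--   return new_look[2][0]
-- ===== SOURCE B (Python) =====
-- def _place(ele, top):
--     # insert ele before the first entry with strictly smaller length (stable for ties)
--     for i, y in enumerate(top):
--         if len(y) < len(ele):
--             return top[:i] + [ele] + top[i:]
--     return top + [ele]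
--
--
-- def ThirdGreatest(arr):
--     seen = set()
--     top = []  # at most 3 entries, lengths non-increasing, first-occurrence order on ties
--     for ele in arr:
--         if ele in seen:
--             continue
--         seen.add(ele)
--         top = _place(ele, top)[:3]
--     return top[2]
-- ===== Notes on version B (the rewrite author's own statement) =====
-- stated objective: alternative
-- what changed: Replaces the dict-of-lengths plus full descending sort with a one-pass scan that keeps only the three longest distinct strings in a bounded insertion buffer (a set for dedup), returning the buffer's third entry.
import Mathlib
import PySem

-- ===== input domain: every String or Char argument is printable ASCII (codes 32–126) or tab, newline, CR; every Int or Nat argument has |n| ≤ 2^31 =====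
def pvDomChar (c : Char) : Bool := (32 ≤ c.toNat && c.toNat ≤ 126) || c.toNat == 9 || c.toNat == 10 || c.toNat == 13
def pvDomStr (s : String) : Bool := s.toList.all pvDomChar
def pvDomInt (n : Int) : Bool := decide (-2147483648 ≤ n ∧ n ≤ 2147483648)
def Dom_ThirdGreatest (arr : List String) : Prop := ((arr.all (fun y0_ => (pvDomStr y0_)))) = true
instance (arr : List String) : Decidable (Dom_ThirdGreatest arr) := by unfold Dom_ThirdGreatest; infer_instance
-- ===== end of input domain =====

-- B replaces A's dict-of-lengths + full descending sort by a one-pass top-3 insertion buffer (objective: alternative algorithm).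

-- ===== PORT A =====
def ThirdGreatest (arr : List String) : String :=
  let look_up := arr.foldl
    (fun d ele => if d.contains ele then d else d.insert ele (PySem.Str.len ele))
    (PySem.Dict.empty : PySem.Dict String Int)
  let new_look := PySem.List.sorted look_up.items (fun x => x.2) true
  -- new_look[2][0]; Pre_ guarantees the index is in range (A raises IndexError otherwise)
  (PySem.List.pyGetD new_look 2 ("", 0)).1

-- ===== PORT B =====
-- _place: insert ele before the first entry of strictly smaller length (B's scan-and-insert loop)
def placeB (ele : String) (top : List String) : List String :=
  PySem.List.insertBy (fun a b => decide (PySem.Str.len b < PySem.Str.len a)) ele top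

def ThirdGreatest_alt (arr : List String) : String :=
  let st := arr.foldl
    (fun st ele =>
      if PySem.Set.contains st.1 ele then st
      else (PySem.Set.add st.1 ele, (placeB ele st.2).take 3))
    ((PySem.Set.empty : PySem.Set String), ([] : List String))
  PySem.List.pyGetD st.2 2 ""

-- ===== PRECONDITION & SPEC =====
-- Pre_: arr has at least 3 distinct elements; otherwise both Pythons raise IndexError on [2].
def Pre_ThirdGreatest (arr : List String) : Prop := 3 ≤ (PySem.Set.ofList arr).length
instance (arr : List String) : Decidable (Pre_ThirdGreatest arr) := by unfold Pre_ThirdGreatest; infer_instance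
def pvWitness_ThirdGreatest : List String := ["a", "bb", "ccc"]

def Spec_ThirdGreatest (arr : List String) (out : String) : Prop := out = ThirdGreatest_alt arr
instance (arr : List String) (out : String) : Decidable (Spec_ThirdGreatest arr out) := by unfold Spec_ThirdGreatest; infer_instance

-- ===== CLAIM (what is proved, stated in full; the proofs are below) =====
def Claim_equal_ThirdGreatest : Prop := ∀ (arr : List String), Dom_ThirdGreatest arr → Pre_ThirdGreatest arr → Spec_ThirdGreatest arr (ThirdGreatest arr)

-- ===== LEMMAS AND PROOFS =====

-- the (element, length) pair A's dict stores
def pairL (e : String) : String × Int := (e, PySem.Str.len e)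

-- first occurrences of arr that are not in seen (the dedup both loops perform)
def dfrom (seen : List String) : List String → List String
  | [] => []
  | x :: xs => if x ∈ seen then dfrom seen xs else x :: dfrom (seen ++ [x]) xs

theorem dfrom_update (arr : List String) : ∀ (s : PySem.Set String),
    s ++ dfrom s arr = PySem.Set.update s arr := by
  induction arr with
  | nil => intro s; simp [dfrom, PySem.Set.update]
  | cons x xs ih =>
    intro s
    by_cases h : x ∈ s
    · rw [PySem.Set.update_cons, PySem.Set.add_of_mem h, dfrom, if_pos h, ih]
    · rw [PySem.Set.update_cons, PySem.Set.add_of_not_mem h, dfrom, if_neg h, ← ih (s ++ [x])]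
      simp

theorem dfrom_nil_eq (arr : List String) : dfrom [] arr = PySem.Set.ofList arr := by
  have := dfrom_update arr []
  simpa [PySem.Set.update_nil_left] using this

theorem itemsA (arr : List String) : ∀ (d : PySem.Dict String Int),
    (arr.foldl (fun d ele => if d.contains ele then d else d.insert ele (PySem.Str.len ele)) d).items
      = d.items ++ (dfrom d.keys arr).map pairL := by
  induction arr with
  | nil => intro d; simp [dfrom]
  | cons x xs ih =>
    intro d
    by_cases h : x ∈ d.keys
    · have hc : d.contains x = true := (PySem.Dict.contains_iff_mem_keys d x).mpr h
      rw [List.foldl_cons]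
      show (xs.foldl _ (if d.contains x = true then d else _)).items = _
      rw [if_pos hc, dfrom, if_pos h, ih]
    · have hc : d.contains x = false := by
        cases hb : d.contains x with
        | false => rfl
        | true => exact absurd ((PySem.Dict.contains_iff_mem_keys d x).mp hb) h
      have hkeys : (d.insert x (PySem.Str.len x)).keys = d.keys ++ [x] :=
        PySem.Dict.keys_insert_of_not_contains d _ hc
      have hitems : (d.insert x (PySem.Str.len x)).items = d.items ++ [(x, PySem.Str.len x)] :=
        PySem.Dict.items_insert_of_not_contains d _ hc
      rw [List.foldl_cons]
      show (xs.foldl _ (if d.contains x = true then d else _)).items = _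
      rw [if_neg (by simp [hc]), dfrom, if_neg h, ih, hitems, hkeys]
      simp [pairL]

theorem foldB (arr : List String) : ∀ (s : PySem.Set String) (t : List String),
    (arr.foldl (fun st ele =>
        if PySem.Set.contains st.1 ele then st
        else (PySem.Set.add st.1 ele, (placeB ele st.2).take 3)) (s, t)).2
      = (dfrom s arr).foldl (fun acc x => (placeB x acc).take 3) t := by
  induction arr with
  | nil => intro s t; simp [dfrom]
  | cons x xs ih =>
    intro s t
    by_cases h : x ∈ s
    · have hc : PySem.Set.contains s x = true := (PySem.Set.contains_iff s x).mpr h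
      rw [List.foldl_cons]
      show (xs.foldl _ (if PySem.Set.contains s x = true then (s, t) else _)).2 = _
      rw [if_pos hc, dfrom, if_pos h, ih]
    · have hc : PySem.Set.contains s x = false := by
        cases hb : PySem.Set.contains s x with
        | false => rfl
        | true => exact absurd ((PySem.Set.contains_iff s x).mp hb) h
      rw [List.foldl_cons]
      show (xs.foldl _ (if PySem.Set.contains s x = true then (s, t) else _)).2 = _
      rw [if_neg (by simpa using h), dfrom, if_neg h, List.foldl_cons, ih]
      simp [PySem.Set.add_of_not_mem h]

theorem take_insertBy (p : String → String → Bool) (x : String) :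
    ∀ (L : List String) (n : Nat),
      ((PySem.List.insertBy p x (L.take n)).take n) = (PySem.List.insertBy p x L).take n := by
  intro L
  induction L with
  | nil => intro n; simp
  | cons y ys ih =>
    intro n
    cases n with
    | zero => simp
    | succ m =>
      by_cases hp : p x y
      · cases m with
        | zero => simp [PySem.List.insertBy, hp]
        | succ k => simp [PySem.List.insertBy, hp, List.take_take]
      · simp [PySem.List.insertBy, hp, ih m]

theorem fold3_eq_sorted_take (D : List String) :
    D.foldl (fun acc x => (placeB x acc).take 3) []
      = (PySem.List.sorted D PySem.Str.len true).take 3 := by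
  rw [PySem.List.sorted_rev_eq_foldl_insertBy]
  induction D using List.reverseRecOn with
  | nil => simp
  | append_singleton D' x ih =>
    rw [List.foldl_append, List.foldl_append]
    simp only [List.foldl_cons, List.foldl_nil, ih]
    exact take_insertBy _ x _ 3

theorem insP_map (x : String) : ∀ (L : List String),
    PySem.List.insertBy (fun a b : String × Int => decide (b.2 < a.2)) (pairL x) (L.map pairL)
      = (placeB x L).map pairL := by
  intro L
  induction L with
  | nil => simp [PySem.List.insertBy, placeB]
  | cons y ys ih =>
    by_cases hp : y.length < x.length
    · simp [PySem.List.insertBy, placeB, pairL, PySem.Str.len, hp]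
    · simp [PySem.List.insertBy, placeB, pairL, PySem.Str.len, hp] at ih ⊢
      exact ih

theorem sorted_map_pairL (D : List String) :
    PySem.List.sorted (D.map pairL) (fun x => x.2) true
      = (PySem.List.sorted D PySem.Str.len true).map pairL := by
  rw [PySem.List.sorted_rev_eq_foldl_insertBy, PySem.List.sorted_rev_eq_foldl_insertBy,
    List.foldl_map]
  have : ∀ (E : List String) (L : List String),
      E.foldl (fun acc x =>
          PySem.List.insertBy (fun a b : String × Int => decide (b.2 < a.2)) (pairL x) acc)
        (L.map pairL)
        = (E.foldl (fun acc x =>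
            PySem.List.insertBy (fun a b => decide (PySem.Str.len b < PySem.Str.len a)) x acc)
          L).map pairL := by
    intro E
    induction E with
    | nil => intro L; simp
    | cons x xs ih =>
      intro L
      simp only [List.foldl_cons]
      rw [insP_map x L]
      exact ih _
  simpa using this D []

-- ===== VERDICT (by name: the statement is the Claim_ definition above) =====
theorem ThirdGreatest_spec : Claim_equal_ThirdGreatest := by
  intro arr _ hpre
  simp only [Spec_ThirdGreatest, ThirdGreatest, ThirdGreatest_alt]
  rw [itemsA arr PySem.Dict.empty, foldB arr PySem.Set.empty []]
  have hempty : (PySem.Dict.empty : PySem.Dict String Int).keys = ([] : List String) := rfl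
  have hsetempty : (PySem.Set.empty : PySem.Set String) = ([] : List String) := rfl
  rw [hempty, hsetempty]
  set D := dfrom [] arr with hD
  have hDlen : 3 ≤ D.length := by
    rw [hD, dfrom_nil_eq]; exact hpre
  have hslen : (PySem.List.sorted D PySem.Str.len true).length = D.length :=
    PySem.List.length_sorted _ _ _
  rw [fold3_eq_sorted_take D]
  have h1 : (PySem.Dict.empty : PySem.Dict String Int).items = ([] : List (String × Int)) := rfl
  rw [h1]
  simp only [List.nil_append]
  rw [sorted_map_pairL D]
  set S := PySem.List.sorted D PySem.Str.len true with hS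
  have h2 : (2 : Nat) < S.length := by omega
  have h2m : (2 : Nat) < (S.map pairL).length := by simpa using h2
  have h2t : (2 : Nat) < (S.take 3).length := by
    simp [List.length_take]; omega
  have hcast : (2 : Int) = ((2 : Nat) : Int) := by norm_num
  have hA : PySem.List.pyGetD (S.map pairL) 2 ("", 0) = (S.map pairL)[2] := by
    rw [hcast]; exact PySem.List.pyGetD_ofNat _ 2 _ h2m
  have hB : PySem.List.pyGetD (S.take 3) 2 "" = (S.take 3)[2] := by
    rw [hcast]; exact PySem.List.pyGetD_ofNat _ 2 _ h2t
  rw [hA, hB]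
  simp [pairL, List.getElem_take]
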